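-- pv_equiv track=rewrite | github.com/MrBrantCode/unitest_baseline | mut_generate/mist_train_cf/cf_82739/solution.py | find_lowest_even_highest_odd
-- ===== SOURCE A (Python) =====
-- def find_lowest_even_highest_odd(dataset):
--     even_list = []
--     odd_list = []
--
--     for num in dataset:
--         if num % 2 == 0:
--             even_list.append(num)
--         else:
--             odd_list.append(num)
--
--     # find 3 lowest even numbers
--     even_lowest = []
--     for _ in range(3):
--         if even_list:  # Check if the list is not empty
--             min_value = min(even_list)
--             even_lowest.append(min_value)
--             even_list.remove(min_value)
--
--     # find 3 highest odd numbers
--     odd_highest = []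
--     for _ in range(3):
--         if odd_list:  # Check if the list is not empty
--             max_value = max(odd_list)
--             odd_highest.append(max_value)
--             odd_list.remove(max_value)
--
--     return even_lowest, odd_highest
-- ===== SOURCE B (Python) =====
-- def find_lowest_even_highest_odd(dataset):
--     evens = [n for n in dataset if n % 2 == 0]
--     odds = [n for n in dataset if n % 2 != 0]
--     return sorted(evens)[:3], sorted(odds, reverse=True)[:3]
-- ===== Notes on version B (the rewrite author's own statement) =====
-- stated objective: simpler
-- what changed: Replaced the two three-iteration min/max-scan-and-remove loops with partition-by-comprehension plus sort-then-slice (sorted(evens)[:3], sorted(odds, reverse=True)[:3]).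
import Mathlib
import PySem

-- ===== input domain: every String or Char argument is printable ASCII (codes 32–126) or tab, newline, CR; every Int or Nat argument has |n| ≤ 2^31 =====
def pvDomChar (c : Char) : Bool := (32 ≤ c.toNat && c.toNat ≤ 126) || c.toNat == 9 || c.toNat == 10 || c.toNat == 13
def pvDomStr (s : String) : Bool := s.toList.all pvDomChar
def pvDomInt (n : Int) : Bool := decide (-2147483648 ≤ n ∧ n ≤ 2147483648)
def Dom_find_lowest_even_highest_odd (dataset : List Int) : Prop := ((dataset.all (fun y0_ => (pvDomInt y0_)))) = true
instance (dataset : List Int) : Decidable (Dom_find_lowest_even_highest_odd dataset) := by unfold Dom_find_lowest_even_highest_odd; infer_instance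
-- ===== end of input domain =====

-- B replaces A's repeated min/max-scan-and-remove loops with parity partition + sort-then-slice (simpler).


-- ===== PORT A =====
-- one iteration of the 'find 3 lowest even numbers' loop body (the 'if even_list:' guard, min, append, remove)
def pvPickMin (s : List Int × List Int) : List Int × List Int :=
  if s.1 ≠ [] then
    match PySem.List.min? s.1 (fun x => x) with
    | some m => ((PySem.List.remove? s.1 m).getD s.1, s.2 ++ [m])
    | none => s
  else s

-- one iteration of the 'find 3 highest odd numbers' loop body
def pvPickMax (s : List Int × List Int) : List Int × List Int :=
  if s.1 ≠ [] then
    match PySem.List.max? s.1 (fun x => x) with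
    | some m => ((PySem.List.remove? s.1 m).getD s.1, s.2 ++ [m])
    | none => s
  else s

def find_lowest_even_highest_odd (dataset : List Int) : List Int × List Int :=
  let p := dataset.foldl (fun (s : List Int × List Int) num =>
    if PySem.Int.mod num 2 == 0 then (s.1 ++ [num], s.2) else (s.1, s.2 ++ [num])) ([], [])
  let evenRes := (List.range 3).foldl (fun s _ => pvPickMin s) (p.1, [])
  let oddRes := (List.range 3).foldl (fun s _ => pvPickMax s) (p.2, [])
  (evenRes.2, oddRes.2)

-- ===== PORT B =====
def find_lowest_even_highest_odd_alt (dataset : List Int) : List Int × List Int :=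
  let evens := dataset.filter (fun n => PySem.Int.mod n 2 == 0)
  let odds := dataset.filter (fun n => !(PySem.Int.mod n 2 == 0))
  ((PySem.List.sorted evens (fun x => x) false).take 3,
   (PySem.List.sorted odds (fun x => x) true).take 3)

-- ===== PRECONDITION & SPEC =====
def Spec_find_lowest_even_highest_odd (dataset : List Int) (out : List Int × List Int) : Prop := out = find_lowest_even_highest_odd_alt dataset
instance (dataset : List Int) (out : List Int × List Int) : Decidable (Spec_find_lowest_even_highest_odd dataset out) := by unfold Spec_find_lowest_even_highest_odd; infer_instance

-- ===== CLAIM (what is proved, stated in full; the proofs are below) =====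
def Claim_equal_find_lowest_even_highest_odd : Prop := ∀ (dataset : List Int), Dom_find_lowest_even_highest_odd dataset → Spec_find_lowest_even_highest_odd dataset (find_lowest_even_highest_odd dataset)

-- ===== LEMMAS AND PROOFS =====

-- A's partition loop builds exactly the two filters B uses
lemma pv_partition (dataset a b : List Int) :
    dataset.foldl (fun (s : List Int × List Int) num =>
      if PySem.Int.mod num 2 == 0 then (s.1 ++ [num], s.2) else (s.1, s.2 ++ [num])) (a, b)
    = (a ++ dataset.filter (fun n => PySem.Int.mod n 2 == 0),
       b ++ dataset.filter (fun n => !(PySem.Int.mod n 2 == 0))) := by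
  induction dataset generalizing a b with
  | nil => simp
  | cons x xs ih =>
    cases h : (PySem.Int.mod x 2 == 0) <;>
      simp only [List.foldl_cons, List.filter_cons, h, Bool.not_true, Bool.not_false,
        if_true, if_false, Bool.false_eq_true, ih, List.append_assoc, List.singleton_append]

-- sorted l = (min l) :: sorted (l minus one copy of its min)
lemma pv_sorted_cons_min (l : List Int) (m : Int)
    (hm : PySem.List.min? l (fun x => x) = some m) :
    PySem.List.sorted l (fun x => x) false = m :: PySem.List.sorted (l.erase m) (fun x => x) false := by
  have hmem : m ∈ l := PySem.List.min?_mem hm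
  apply List.Perm.eq_of_pairwise (le := (· ≤ ·))
    (fun a b _ _ h1 h2 => le_antisymm h1 h2)
    (PySem.List.sorted_pairwise l (fun x => x)) ?_
    ((PySem.List.sorted_perm l (fun x => x) false).trans
      ((List.perm_cons_erase hmem).trans
        ((PySem.List.sorted_perm (l.erase m) (fun x => x) false).cons m).symm))
  · refine List.Pairwise.cons ?_ (PySem.List.sorted_pairwise (l.erase m) (fun x => x))
    intro y hy
    exact PySem.List.min?_isMin hm y (List.mem_of_mem_erase ((PySem.List.mem_sorted _ _ _ _).1 hy))

-- sorted l (reverse) = (max l) :: sorted (l minus one copy of its max) (reverse)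
lemma pv_sorted_rev_cons_max (l : List Int) (m : Int)
    (hm : PySem.List.max? l (fun x => x) = some m) :
    PySem.List.sorted l (fun x => x) true = m :: PySem.List.sorted (l.erase m) (fun x => x) true := by
  have hmem : m ∈ l := PySem.List.max?_mem hm
  apply List.Perm.eq_of_pairwise (le := fun a b => b ≤ a)
    (fun a b _ _ h1 h2 => le_antisymm h2 h1)
    (PySem.List.sorted_pairwise_rev l (fun x => x)) ?_
    ((PySem.List.sorted_perm l (fun x => x) true).trans
      ((List.perm_cons_erase hmem).trans
        ((PySem.List.sorted_perm (l.erase m) (fun x => x) true).cons m).symm))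
  · refine List.Pairwise.cons ?_ (PySem.List.sorted_pairwise_rev (l.erase m) (fun x => x))
    intro y hy
    exact PySem.List.max?_isMax hm y (List.mem_of_mem_erase ((PySem.List.mem_sorted _ _ _ _).1 hy))

-- k rounds of pick-min append the first k elements of the ascending sort
lemma pv_iter_min : ∀ (k : Nat) (l acc : List Int),
    (pvPickMin^[k] (l, acc)).2 = acc ++ (PySem.List.sorted l (fun x => x) false).take k := by
  intro k
  induction k with
  | zero => intro l acc; simp
  | succ k ih =>
    intro l acc
    rw [Function.iterate_succ_apply]
    rcases eq_or_ne l [] with rfl | hne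
    · simp [pvPickMin, ih]
    · obtain ⟨m, hm⟩ : ∃ m, PySem.List.min? l (fun x => x) = some m := by
        cases h : PySem.List.min? l (fun x => x) with
        | none => exact absurd ((PySem.List.min?_eq_none_iff l (fun x => x)).1 h) hne
        | some m => exact ⟨m, rfl⟩
      have hmem : m ∈ l := PySem.List.min?_mem hm
      have hrem : PySem.List.remove? l m = some (l.erase m) := PySem.List.remove?_eq_some_erase l m hmem
      simp only [pvPickMin, hne, hm, hrem, if_pos, ne_eq, not_false_eq_true, Option.getD_some]
      rw [ih, pv_sorted_cons_min l m hm]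
      simp

-- k rounds of pick-max append the first k elements of the descending sort
lemma pv_iter_max : ∀ (k : Nat) (l acc : List Int),
    (pvPickMax^[k] (l, acc)).2 = acc ++ (PySem.List.sorted l (fun x => x) true).take k := by
  intro k
  induction k with
  | zero => intro l acc; simp
  | succ k ih =>
    intro l acc
    rw [Function.iterate_succ_apply]
    rcases eq_or_ne l [] with rfl | hne
    · simp [pvPickMax, ih]
    · obtain ⟨m, hm⟩ : ∃ m, PySem.List.max? l (fun x => x) = some m := by
        cases h : PySem.List.max? l (fun x => x) with
        | none => exact absurd ((PySem.List.max?_eq_none_iff l (fun x => x)).1 h) hne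
        | some m => exact ⟨m, rfl⟩
      have hmem : m ∈ l := PySem.List.max?_mem hm
      have hrem : PySem.List.remove? l m = some (l.erase m) := PySem.List.remove?_eq_some_erase l m hmem
      simp only [pvPickMax, hne, hm, hrem, if_pos, ne_eq, not_false_eq_true, Option.getD_some]
      rw [ih, pv_sorted_rev_cons_max l m hm]
      simp

lemma pv_foldl_range3 (f : List Int × List Int → List Int × List Int) (s : List Int × List Int) :
    (List.range 3).foldl (fun s _ => f s) s = f^[3] s := rfl

-- ===== VERDICT (by name: the statement is the Claim_ definition above) =====
theorem find_lowest_even_highest_odd_spec : Claim_equal_find_lowest_even_highest_odd := by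
  intro dataset _
  unfold Spec_find_lowest_even_highest_odd find_lowest_even_highest_odd find_lowest_even_highest_odd_alt
  simp only [pv_partition dataset [] [], List.nil_append, pv_foldl_range3, pv_iter_min, pv_iter_max]
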